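-- pv_equiv track=rewrite | github.com/HyelinNAM/morgorithm | 파이썬알고리즘인터뷰/p247.py | remove_n_sort
-- ===== SOURCE A (Python) =====
-- import collections
--
-- def remove_n_sort(string):
--
--     counter, seen, stack = collections.Counter(string), set(), []
--
--     for s in string:
--         counter[s] -= 1
--
--         if s in seen:
--             continue
--
--         while stack and s < stack[-1] and counter[stack[-1]] > 0 : # and
--             seen.remove(stack.pop())
--
--         stack.append(s)
--         seen.add(s)
--
--     return ''.join(stack)
-- ===== SOURCE B (Python) =====
-- import collections
--
-- def remove_n_sort(string):
--     # Recursive greedy selection: pick the first character of the answer directly,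
--     # then recurse on the rest of the string with that character removed.
--     if not string:
--         return ''
--     counts = collections.Counter(string)
--     pos, best = 0, string[0]
--     for i, c in enumerate(string):
--         if c < best:
--             pos, best = i, c
--         counts[c] -= 1
--         if counts[c] == 0:
--             break
--     return best + remove_n_sort(string[pos + 1:].replace(best, ''))
-- ===== Notes on version B (the rewrite author's own statement) =====
-- stated objective: alternative
-- what changed: B replaces A's single-pass monotonic-stack sweep (Counter + seen set + pop loop) by the recursive selection algorithm: scan with decrementing counts until some character's remaining count hits zero, emit the smallest character seen up to that point, and recurse on the suffix after it with that character removed.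
import Mathlib
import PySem

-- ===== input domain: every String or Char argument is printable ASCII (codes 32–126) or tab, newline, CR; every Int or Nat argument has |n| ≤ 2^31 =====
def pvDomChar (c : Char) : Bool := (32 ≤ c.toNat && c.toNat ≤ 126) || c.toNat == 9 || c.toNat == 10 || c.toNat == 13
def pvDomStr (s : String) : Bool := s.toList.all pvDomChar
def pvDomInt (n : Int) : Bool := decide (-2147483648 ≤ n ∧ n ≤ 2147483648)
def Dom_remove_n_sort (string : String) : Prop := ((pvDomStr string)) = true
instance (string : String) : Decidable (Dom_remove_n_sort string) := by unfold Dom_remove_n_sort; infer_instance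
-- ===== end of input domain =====

-- B replaces A's single-pass monotonic-stack sweep by the recursive selection algorithm:
-- pick the answer's first character directly (smallest char before the first exhausted one),
-- then recurse on the remaining suffix with that character deleted (objective: alternative).

-- ===== PORT A =====
-- the stack is represented head = top (reversed); ''.join(stack) is String.ofList of its reverse
-- inner while loop: pop while s < stack[-1] and counter[stack[-1]] > 0, removing popped chars from seen
def popA (counter : PySem.Dict Char Int) (c : Char) : PySem.Set Char → List Char → PySem.Set Char × List Char
  | seen, [] => (seen, [])
  | seen, t :: st =>
      if c < t ∧ counter.getD t 0 > 0 then
        -- seen.remove(stack.pop()): the popped char is always in seen, so remove = discard (no KeyError)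
        popA counter c (PySem.Set.discard seen t) st
      else (seen, t :: st)

def stepA (st : PySem.Dict Char Int × PySem.Set Char × List Char) (c : Char) :
    PySem.Dict Char Int × PySem.Set Char × List Char :=
  let counter := st.1.modify c 0 (· - 1)      -- counter[s] -= 1
  if PySem.Set.contains st.2.1 c then (counter, st.2.1, st.2.2)   -- if s in seen: continue
  else
    let r := popA counter c st.2.1 st.2.2
    (counter, PySem.Set.add r.1 c, c :: r.2)  -- stack.append(s); seen.add(s)

def remove_n_sort (string : String) : String :=
  let r := string.toList.foldl stepA
    (PySem.Dict.counter string.toList, (PySem.Set.empty : PySem.Set Char), ([] : List Char))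
  String.ofList r.2.2.reverse

-- ===== PORT B =====
-- the scan loop of B: decrement counts, track (pos, best), break when a count hits 0
def scanB (counts : PySem.Dict Char Int) : List Char → Int → Int → Char → Int × Char
  | [], _, pos, best => (pos, best)
  | c :: cs, i, pos, best =>
      let pos' := if c < best then i else pos
      let best' := if c < best then c else best
      let counts' := counts.modify c 0 (· - 1)
      if counts'.getD c 0 == 0 then (pos', best')
      else scanB counts' cs (i + 1) pos' best'

-- termination facts for removeRec (cited by its decreasing_by, so they live above the port)
theorem scanB_fst_nonneg (cs : List Char) : ∀ (d : PySem.Dict Char Int) (i pos : Int) (best : Char),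
    0 ≤ i → 0 ≤ pos → 0 ≤ (scanB d cs i pos best).1 := by
  induction cs with
  | nil => intro d i pos best _ h; simpa [scanB] using h
  | cons c cs ih =>
      intro d i pos best hi hpos
      simp only [scanB]
      split
      · split <;> simp_all
      · exact ih _ _ _ _ (by omega) (by split <;> omega)

-- s.replace(b, '') deletes every occurrence of the single character b
theorem replace_go_single (b : Char) : ∀ (l : List Char) (fuel : Nat) (acc : List Char),
    l.length ≤ fuel →
    PySem.Chars.replace.go [b] [] fuel l acc = acc.reverse ++ l.filter (fun x => x != b) := by
  intro l
  induction l with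
  | nil => intro fuel acc _; cases fuel <;> simp [PySem.Chars.replace.go]
  | cons c t ih =>
      intro fuel acc hf
      cases fuel with
      | zero => simp at hf
      | succ f =>
          simp only [PySem.Chars.replace.go, List.isPrefixOf]
          by_cases hbc : b = c
          · subst hbc
            simp only [beq_self_eq_true, Bool.and_true, if_pos]
            rw [List.length_cons] at hf
            simpa [List.filter] using ih f acc (by omega)
          · have : (b == c) = false := by simpa using hbc
            simp only [this, Bool.false_and, if_neg Bool.false_ne_true]
            rw [List.length_cons] at hf
            rw [ih f (c :: acc) (by omega)]
            simp [List.filter, bne, (by simpa using Ne.symm hbc : (c == b) = false)]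

theorem replace_single_nil (b : Char) (l : List Char) :
    PySem.Chars.replace l [b] [] = l.filter (fun x => x != b) := by
  simpa [PySem.Chars.replace] using replace_go_single b l l.length [] le_rfl

theorem red_length_lt (l : List Char) (b : Char) (p : Int) (hp : 0 ≤ p) (hl : l ≠ []) :
    (PySem.Chars.replace (PySem.List.slice l (some (p + 1)) none) [b] []).length < l.length := by
  rw [replace_single_nil]
  rw [PySem.List.slice_from (xs := l) (by omega : (0:Int) ≤ p + 1)]
  have h1 : (p + 1).toNat = p.toNat + 1 := by omega
  have h2 := List.length_filter_le (fun x => x != b) (l.drop (p + 1).toNat)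
  have h3 : (l.drop (p + 1).toNat).length = l.length - (p + 1).toNat := List.length_drop ..
  have h4 : 0 < l.length := List.length_pos_of_ne_nil hl
  omega

-- the recursion of B: emit the chosen character, recurse on the reduced suffix
def removeRec : List Char → List Char
  | [] => []
  | c :: cs =>
      let pb := scanB (PySem.Dict.counter (c :: cs)) (c :: cs) 0 0 c
      pb.2 :: removeRec (PySem.Chars.replace (PySem.List.slice (c :: cs) (some (pb.1 + 1)) none) [pb.2] [])
termination_by l => l.length
decreasing_by
  exact red_length_lt (c :: cs) _ _ (scanB_fst_nonneg _ _ _ _ _ le_rfl le_rfl) (by simp)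

def remove_n_sort_alt (string : String) : String :=
  String.ofList (removeRec string.toList)

-- ===== PRECONDITION & SPEC =====
def Spec_remove_n_sort (string : String) (out : String) : Prop := out = remove_n_sort_alt string
instance (string : String) (out : String) : Decidable (Spec_remove_n_sort string out) := by unfold Spec_remove_n_sort; infer_instance

-- ===== CLAIM (what is proved, stated in full; the proofs are below) =====
def Claim_equal_remove_n_sort : Prop := ∀ (string : String), Dom_remove_n_sort string → Spec_remove_n_sort string (remove_n_sort string)

-- ===== LEMMAS AND PROOFS =====

-- A's fold, abbreviated
def Afold (l : List Char) : List Char :=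
  (l.foldl stepA (PySem.Dict.counter l, (PySem.Set.empty : PySem.Set Char), ([] : List Char))).2.2

-- last occurrence of a member
theorem lastOcc (x : Char) : ∀ (l : List Char), x ∈ l →
    ∃ j, l[j]? = some x ∧ x ∉ l.drop (j + 1) := by
  intro l
  induction l with
  | nil => simp
  | cons c t ih =>
      intro hx
      by_cases hxt : x ∈ t
      · obtain ⟨j, hj1, hj2⟩ := ih hxt
        exact ⟨j + 1, by simpa using hj1, by simpa using hj2⟩
      · have hxc : x = c := by rcases List.mem_cons.mp hx with h | h; exact h; exact absurd h hxt
        exact ⟨0, by simp [hxc], by simpa using hxt⟩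

-- counter invariant step: after counter[c] -= 1 with counter = counts of (c :: l'), counter = counts of l'
theorem counter_step (counter : PySem.Dict Char Int) (c : Char) (l' : List Char)
    (h : ∀ t, counter.getD t 0 = ((c :: l').count t : Int)) :
    ∀ t, (counter.modify c 0 (· - 1)).getD t 0 = (l'.count t : Int) := by
  intro t
  rw [PySem.Dict.getD_modify]
  by_cases ht : t = c
  · subst ht; rw [if_pos rfl, h]; simp
  · rw [if_neg ht, h]
    simp [Ne.symm ht]

-- the result of popA is a suffix of its input stack
theorem popA_suffix (counter : PySem.Dict Char Int) (c : Char) :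
    ∀ (stack : List Char) (seen : PySem.Set Char), (popA counter c seen stack).2 <:+ stack := by
  intro stack
  induction stack with
  | nil => intro seen; simp [popA]
  | cons t st ih =>
      intro seen
      simp only [popA]
      split
      · exact (ih _).trans (List.suffix_cons t st)
      · exact List.suffix_refl _

-- the seen invariant (seen = elements of the stack) is preserved by the pop loop
theorem popA_seen (counter : PySem.Dict Char Int) (c : Char) :
    ∀ (stack : List Char) (seen : PySem.Set Char),
      stack.Nodup → (∀ t, t ∈ seen ↔ t ∈ stack) →
      (∀ t, t ∈ (popA counter c seen stack).1 ↔ t ∈ (popA counter c seen stack).2) := by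
  intro stack
  induction stack with
  | nil => intro seen _ hs t; simpa [popA] using hs t
  | cons x st ih =>
      intro seen hnd hs t
      simp only [popA]
      split
      · refine ih _ (List.Nodup.of_cons hnd) ?_ t
        intro u
        rw [PySem.Set.mem_discard, hs u]
        constructor
        · rintro ⟨hu, hne⟩
          rcases List.mem_cons.mp hu with h | h
          · exact absurd h hne
          · exact h
        · intro hu
          exact ⟨List.mem_cons_of_mem _ hu, fun he => (List.nodup_cons.mp hnd).1 (he ▸ hu)⟩
      · exact hs t

-- every element popped off the stack had a positive remaining count
theorem popA_popped (counter : PySem.Dict Char Int) (c x : Char) :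
    ∀ (stack : List Char) (seen : PySem.Set Char),
      x ∈ stack → x ∉ (popA counter c seen stack).2 → counter.getD x 0 > 0 := by
  intro stack
  induction stack with
  | nil => simp
  | cons t st ih =>
      intro seen hx hnx
      simp only [popA] at hnx
      by_cases h : c < t ∧ counter.getD t 0 > 0
      · rw [if_pos h] at hnx
        rcases List.mem_cons.mp hx with rfl | hx'
        · exact h.2
        · exact ih _ hx' hnx
      · rw [if_neg h] at hnx
        exact absurd hx hnx

-- if every stack element is poppable, the whole stack is popped and seen loses all of it
theorem popA_all (counter : PySem.Dict Char Int) (c : Char) :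
    ∀ (stack : List Char) (seen : PySem.Set Char),
      (∀ x ∈ stack, c < x ∧ counter.getD x 0 > 0) →
      (popA counter c seen stack).2 = [] ∧
      (∀ y, y ∈ (popA counter c seen stack).1 ↔ y ∈ seen ∧ y ∉ stack) := by
  intro stack
  induction stack with
  | nil => intro seen _; simp [popA]
  | cons t st ih =>
      intro seen hall
      simp only [popA]
      rw [if_pos (hall t (by simp))]
      obtain ⟨h1, h2⟩ := ih (PySem.Set.discard seen t) (fun x hx => hall x (by simp [hx]))
      refine ⟨h1, fun y => ?_⟩
      rw [h2 y, PySem.Set.mem_discard]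
      simp only [List.mem_cons]
      tauto

-- the two pop loops march down u in lock step; the bottom m of the A-side stack is never reached
theorem popSim (C1 C2 : PySem.Dict Char Int) (c m : Char) :
    ∀ (u : List Char) (S1 S2 : PySem.Set Char),
      m ∉ u →
      (∀ x, x ∈ S1 ↔ x = m ∨ x ∈ S2) →
      (∀ x ∈ u, (C1.getD x 0 > 0 ↔ C2.getD x 0 > 0)) →
      (¬(c < m ∧ C1.getD m 0 > 0) ∨ ∃ x ∈ u, ¬(c < x ∧ C2.getD x 0 > 0)) →
      (popA C1 c S1 (u ++ [m])).2 = (popA C2 c S2 u).2 ++ [m] ∧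
      (∀ y, y ∈ (popA C1 c S1 (u ++ [m])).1 ↔ y = m ∨ y ∈ (popA C2 c S2 u).1) := by
  intro u
  induction u with
  | nil =>
      intro S1 S2 _ hS _ hstop
      have hne : ¬(c < m ∧ C1.getD m 0 > 0) := by
        rcases hstop with h | ⟨x, hx, _⟩
        · exact h
        · simp at hx
      simp only [List.nil_append, popA, if_neg hne]
      exact ⟨trivial, hS⟩
  | cons t u' ih =>
      intro S1 S2 hm hS hc hstop
      have htm : t ≠ m := fun h => hm (h ▸ List.mem_cons_self)
      simp only [List.cons_append, popA]
      by_cases hpop : c < t ∧ C2.getD t 0 > 0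
      · have hpop1 : c < t ∧ C1.getD t 0 > 0 := ⟨hpop.1, (hc t (by simp)).mpr hpop.2⟩
        rw [if_pos hpop1, if_pos hpop]
        refine ih (PySem.Set.discard S1 t) (PySem.Set.discard S2 t)
          (fun h => hm (List.mem_cons_of_mem _ h))
          (fun x => by
            rw [PySem.Set.mem_discard, PySem.Set.mem_discard, hS x]
            constructor
            · rintro ⟨h | h, hne⟩
              · exact Or.inl h
              · exact Or.inr ⟨h, hne⟩
            · rintro (h | ⟨h, hne⟩)
              · exact ⟨Or.inl h, h ▸ Ne.symm htm⟩
              · exact ⟨Or.inr h, hne⟩)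
          (fun x hx => hc x (by simp [hx])) ?_
        rcases hstop with h | ⟨x, hx, hnx⟩
        · exact Or.inl h
        · rcases List.mem_cons.mp hx with rfl | hx'
          · exact absurd hpop hnx
          · exact Or.inr ⟨x, hx', hnx⟩
      · have hpop1 : ¬(c < t ∧ C1.getD t 0 > 0) := fun h => hpop ⟨h.1, (hc t (by simp)).mp h.2⟩
        rw [if_neg hpop1, if_neg hpop]
        exact ⟨rfl, hS⟩

-- the guard: any future character below m that still has an m after it is preceded
-- by a blocker — an unpoppable stack element or a position that is its char's last occurrence
def Guard (m : Char) (t u : List Char) : Prop :=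
  ∀ j cj, t[j]? = some cj → cj < m → m ∈ t.drop (j + 1) →
    (∃ x ∈ u, x ∉ t) ∨ (∃ i, i < j ∧ ∃ ci, t[i]? = some ci ∧ ci ∉ t.drop (i + 1))

theorem guard_tail (m c : Char) (t' u u' : List Char)
    (h : Guard m (c :: t') u)
    (hsub : ∀ x ∈ u, x ∉ (c :: t') → x ∈ u')
    (hc : c = m ∨ (c ∉ t' → c ∈ u')) :
    Guard m t' u' := by
  intro j cj hj hcj hmj
  have hd : (c :: t')[j + 1]? = some cj := by simpa using hj
  have hm' : m ∈ (c :: t').drop (j + 1 + 1) := by simpa using hmj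
  rcases h (j + 1) cj hd hcj hm' with ⟨x, hxu, hxt⟩ | ⟨i, hij, ci, hi1, hi2⟩
  · exact Or.inl ⟨x, hsub x hxu hxt, fun hx => hxt (List.mem_cons_of_mem _ hx)⟩
  · cases i with
    | zero =>
        have hci : c = ci := by simpa using hi1
        subst hci
        have hct' : c ∉ t' := by simpa using hi2
        rcases hc with rfl | hc'
        · exact absurd (List.mem_of_mem_drop hmj) hct'
        · exact Or.inl ⟨c, hc' hct', hct'⟩
    | succ i' =>
        refine Or.inr ⟨i', by omega, ci, by simpa using hi1, by simpa using hi2⟩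

-- generic invariants of A's fold over an arbitrary prefix
theorem foldA_inv : ∀ (p rest : List Char) (C : PySem.Dict Char Int) (S : PySem.Set Char)
    (st P : List Char),
    (∀ x, C.getD x 0 = ((p ++ rest).count x : Int)) →
    (∀ x, x ∈ S ↔ x ∈ st) → st.Nodup → (∀ x ∈ st, x ∈ P) →
    (∀ x, (p.foldl stepA (C, S, st)).1.getD x 0 = (rest.count x : Int)) ∧
    (∀ x, x ∈ (p.foldl stepA (C, S, st)).2.1 ↔ x ∈ (p.foldl stepA (C, S, st)).2.2) ∧
    (p.foldl stepA (C, S, st)).2.2.Nodup ∧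
    (∀ x ∈ (p.foldl stepA (C, S, st)).2.2, x ∈ P ++ p) := by
  intro p
  induction p with
  | nil =>
      intro rest C S st P hC hS hnd hP
      simpa using ⟨hC, hS, hnd, hP⟩
  | cons a p' ih =>
      intro rest C S st P hC hS hnd hP
      rw [List.foldl_cons]
      have hC' := counter_step C a (p' ++ rest)
        (fun x => by simpa using hC x)
      by_cases ha : a ∈ S
      · have hA : stepA (C, S, st) a = (C.modify a 0 (· - 1), S, st) := by
          simp [stepA, ha]
        rw [hA]
        obtain ⟨h1, h2, h3, h4⟩ := ih rest (C.modify a 0 (· - 1)) S st (P ++ [a]) hC' hS hnd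
          (fun x hx => List.mem_append_left _ (hP x hx))
        exact ⟨h1, h2, h3, fun x hx => by simpa using h4 x hx⟩
      · have hA : stepA (C, S, st) a
            = (C.modify a 0 (· - 1),
               PySem.Set.add (popA (C.modify a 0 (· - 1)) a S st).1 a,
               a :: (popA (C.modify a 0 (· - 1)) a S st).2) := by
          simp [stepA, ha]
        rw [hA]
        have hast : a ∉ st := fun h => ha ((hS a).mpr h)
        have hsuf := popA_suffix (C.modify a 0 (· - 1)) a st S
        have hnd' : (a :: (popA (C.modify a 0 (· - 1)) a S st).2).Nodup := by
          rw [List.nodup_cons]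
          exact ⟨fun h => hast (hsuf.subset h), hnd.sublist hsuf.sublist⟩
        have hS' : ∀ x, x ∈ PySem.Set.add (popA (C.modify a 0 (· - 1)) a S st).1 a
            ↔ x ∈ a :: (popA (C.modify a 0 (· - 1)) a S st).2 := by
          intro x
          rw [PySem.Set.mem_add, List.mem_cons,
            popA_seen (C.modify a 0 (· - 1)) a st S hnd hS x]
          tauto
        obtain ⟨h1, h2, h3, h4⟩ := ih rest (C.modify a 0 (· - 1)) _ _ (P ++ [a]) hC' hS' hnd'
          (fun x hx => by
            rcases List.mem_cons.mp hx with rfl | hx'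
            · simp
            · exact List.mem_append_left _ (hP x (hsuf.subset hx')))
        exact ⟨h1, h2, h3, fun x hx => by simpa using h4 x hx⟩

-- the simulation: A's loop with bottom element m pinned tracks A's loop on the m-filtered list
theorem simA (m : Char) : ∀ (t : List Char) (C1 C2 : PySem.Dict Char Int)
    (S1 S2 : PySem.Set Char) (u : List Char),
    (∀ x, C1.getD x 0 = (t.count x : Int)) →
    (∀ x, C2.getD x 0 = ((t.filter (fun y => y != m)).count x : Int)) →
    (∀ x, x ∈ S1 ↔ x = m ∨ x ∈ S2) →
    (∀ x, x ∈ S2 ↔ x ∈ u) →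
    m ∉ u → u.Nodup → Guard m t u →
    (t.foldl stepA (C1, S1, u ++ [m])).2.2
      = ((t.filter (fun y => y != m)).foldl stepA (C2, S2, u)).2.2 ++ [m] := by
  intro t
  induction t with
  | nil => intro C1 C2 S1 S2 u _ _ _ _ _ _ _; simp
  | cons c t' ih =>
      intro C1 C2 S1 S2 u hC1 hC2 hS1 hS2 hmu hnd hG
      have hC1' := counter_step C1 c t' hC1
      by_cases hcm : c = m
      · subst hcm
        have hfilter : (c :: t').filter (fun y => y != c) = t'.filter (fun y => y != c) := by
          simp [List.filter]
        have hcS1 : c ∈ S1 := (hS1 c).mpr (Or.inl rfl)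
        have hA : stepA (C1, S1, u ++ [c]) c = (C1.modify c 0 (· - 1), S1, u ++ [c]) := by
          simp [stepA, hcS1]
        rw [List.foldl_cons, hA, hfilter]
        refine ih (C1.modify c 0 (· - 1)) C2 S1 S2 u hC1'
          (fun x => by rw [hC2 x, hfilter]) hS1 hS2 hmu hnd ?_
        exact guard_tail c c t' u u hG (fun x hx _ => hx) (Or.inl rfl)
      · have hfilter : (c :: t').filter (fun y => y != m) = c :: t'.filter (fun y => y != m) := by
          have : (c != m) = true := by simpa using hcm
          simp [List.filter, this]
        have hC2' := counter_step C2 c (t'.filter (fun y => y != m))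
          (fun x => by rw [hC2 x, hfilter])
        by_cases hcu : c ∈ u
        · have hcS2 : c ∈ S2 := (hS2 c).mpr hcu
          have hcS1 : c ∈ S1 := (hS1 c).mpr (Or.inr hcS2)
          have hA : stepA (C1, S1, u ++ [m]) c = (C1.modify c 0 (· - 1), S1, u ++ [m]) := by
            simp [stepA, hcS1]
          have hB : stepA (C2, S2, u) c = (C2.modify c 0 (· - 1), S2, u) := by
            simp [stepA, hcS2]
          rw [List.foldl_cons, hA, hfilter, List.foldl_cons, hB]
          refine ih _ _ S1 S2 u hC1' hC2' hS1 hS2 hmu hnd ?_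
          exact guard_tail m c t' u u hG (fun x hx _ => hx) (Or.inr (fun _ => hcu))
        · have hcS2 : c ∉ S2 := fun h => hcu ((hS2 c).mp h)
          have hcS1 : c ∉ S1 := fun h => by
            rcases (hS1 c).mp h with h' | h'
            · exact hcm h'
            · exact hcS2 h'
          have hA : stepA (C1, S1, u ++ [m]) c
              = (C1.modify c 0 (· - 1),
                 PySem.Set.add (popA (C1.modify c 0 (· - 1)) c S1 (u ++ [m])).1 c,
                 c :: (popA (C1.modify c 0 (· - 1)) c S1 (u ++ [m])).2) := by
            simp [stepA, hcS1]
          have hB : stepA (C2, S2, u) c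
              = (C2.modify c 0 (· - 1),
                 PySem.Set.add (popA (C2.modify c 0 (· - 1)) c S2 u).1 c,
                 c :: (popA (C2.modify c 0 (· - 1)) c S2 u).2) := by
            simp [stepA, hcS2]
          have hcounts : ∀ x ∈ u, ((C1.modify c 0 (· - 1)).getD x 0 > 0
              ↔ (C2.modify c 0 (· - 1)).getD x 0 > 0) := by
            intro x hx
            have hxm : x ≠ m := fun h => hmu (h ▸ hx)
            rw [hC1' x, hC2' x, List.count_filter (by simpa using hxm)]
          have hstop : ¬(c < m ∧ (C1.modify c 0 (· - 1)).getD m 0 > 0)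
              ∨ ∃ x ∈ u, ¬(c < x ∧ (C2.modify c 0 (· - 1)).getD x 0 > 0) := by
            by_cases hd : c < m ∧ (C1.modify c 0 (· - 1)).getD m 0 > 0
            · have hmt' : m ∈ t' := by
                have := hd.2
                rw [hC1' m] at this
                exact List.count_pos_iff.mp (by exact_mod_cast this)
              rcases hG 0 c (by simp) hd.1 (by simpa using hmt') with ⟨x, hxu, hxt⟩ | ⟨i, hi, _⟩
              · refine Or.inr ⟨x, hxu, fun hcx => ?_⟩
                have hxt' : x ∉ t'.filter (fun y => y != m) := fun h =>
                  hxt (List.mem_cons_of_mem _ (List.mem_of_mem_filter h))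
                have := hcx.2
                rw [hC2' x] at this
                exact hxt' (List.count_pos_iff.mp (by exact_mod_cast this))
              · omega
            · exact Or.inl hd
          obtain ⟨hpopeq, hpopseen⟩ := popSim (C1.modify c 0 (· - 1)) (C2.modify c 0 (· - 1))
            c m u S1 S2 hmu hS1 hcounts hstop
          have hsuf := popA_suffix (C2.modify c 0 (· - 1)) c u S2
          have hseen2 := popA_seen (C2.modify c 0 (· - 1)) c u S2 hnd hS2
          rw [List.foldl_cons, hA, hfilter, List.foldl_cons, hB]
          have hstack : c :: (popA (C1.modify c 0 (· - 1)) c S1 (u ++ [m])).2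
              = (c :: (popA (C2.modify c 0 (· - 1)) c S2 u).2) ++ [m] := by
            rw [hpopeq, List.cons_append]
          rw [hstack]
          refine ih _ _ _ _ _ hC1' hC2' ?_ ?_ ?_ ?_ ?_
          · intro x
            rw [PySem.Set.mem_add, PySem.Set.mem_add, hpopseen x]
            constructor
            · rintro ((h | h) | h)
              · exact Or.inl h
              · exact Or.inr (Or.inl h)
              · exact Or.inr (Or.inr h)
            · rintro (h | (h | h))
              · exact Or.inl (Or.inl h)
              · exact Or.inl (Or.inr h)
              · exact Or.inr h
          · intro x
            rw [PySem.Set.mem_add, List.mem_cons, hseen2 x]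
            tauto
          · intro h
            rcases List.mem_cons.mp h with h' | h'
            · exact hcm h'.symm
            · exact hmu (hsuf.subset h')
          · rw [List.nodup_cons]
            exact ⟨fun h => hcu (hsuf.subset h), hnd.sublist hsuf.sublist⟩
          · refine guard_tail m c t' u _ hG (fun x hxu hxt => ?_)
              (Or.inr (fun _ => List.mem_cons_self))
            by_cases hxp : x ∈ (popA (C2.modify c 0 (· - 1)) c S2 u).2
            · exact List.mem_cons_of_mem _ hxp
            · exfalso
              have := popA_popped (C2.modify c 0 (· - 1)) c x u S2 hxu hxp
              rw [hC2' x] at this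
              have hxmem := List.count_pos_iff.mp (by exact_mod_cast this)
              exact hxt (List.mem_cons_of_mem _ (List.mem_of_mem_filter hxmem))

-- the scan loop's invariant: (pos, best) is the leftmost minimum of the processed prefix,
-- no processed index is its character's last occurrence, and the loop breaks at the first one
theorem scanB_go (l : List Char) : ∀ (rest pre : List Char) (d : PySem.Dict Char Int)
    (pos : Int) (best : Char),
    l = pre ++ rest → 0 < pre.length →
    (∀ x, d.getD x 0 = (rest.count x : Int)) →
    0 ≤ pos → pos.toNat < pre.length → l[pos.toNat]? = some best →
    (∀ j, j < pos.toNat → ∀ cj, l[j]? = some cj → best < cj) →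
    (∀ j, j < pre.length → ∀ cj, l[j]? = some cj → best ≤ cj) →
    (∀ j, j < pre.length → ∀ cj, l[j]? = some cj → cj ∈ l.drop (j + 1)) →
    ∃ k, k < l.length ∧
      (∀ j, j < k → ∀ cj, l[j]? = some cj → cj ∈ l.drop (j + 1)) ∧
      (∀ ck, l[k]? = some ck → ck ∉ l.drop (k + 1)) ∧
      0 ≤ (scanB d rest (pre.length : Int) pos best).1 ∧
      (scanB d rest (pre.length : Int) pos best).1.toNat ≤ k ∧
      l[(scanB d rest (pre.length : Int) pos best).1.toNat]?
        = some (scanB d rest (pre.length : Int) pos best).2 ∧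
      (∀ j, j < (scanB d rest (pre.length : Int) pos best).1.toNat →
        ∀ cj, l[j]? = some cj → (scanB d rest (pre.length : Int) pos best).2 < cj) ∧
      (∀ j, j ≤ k → ∀ cj, l[j]? = some cj → (scanB d rest (pre.length : Int) pos best).2 ≤ cj) := by
  intro rest
  induction rest with
  | nil =>
      intro pre d pos best hl hpre _ _ _ _ _ _ hI6
      exfalso
      have hlp : l.length = pre.length := by rw [hl]; simp
      have hlen : 0 < l.length := by omega
      have hx : l[l.length - 1]? = some l[l.length - 1] := List.getElem?_eq_getElem (by omega)
      have := hI6 (l.length - 1) (by omega) _ hx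
      rw [Nat.sub_add_cancel (by omega), List.drop_length] at this
      simp at this
  | cons a rest' ih =>
      intro pre d pos best hl hpre hd hpos0 hposlt hlpos hstrict hmin hI6
      have hla : l[pre.length]? = some a := by rw [hl]; simp
      have hdropa : l.drop (pre.length + 1) = rest' := by
        rw [hl]; simp only [List.drop_length_add_append, List.drop_succ_cons, List.drop_zero]
      have hd' := counter_step d a rest' hd
      simp only [scanB]
      by_cases hcb : a < best
      · simp only [if_pos hcb]
        by_cases hbrk : a ∈ rest'
        · have hne : (d.modify a 0 (· - 1)).getD a 0 ≠ 0 := by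
            rw [hd' a]; have := List.count_pos_iff.mpr hbrk; omega
          rw [if_neg (by simpa using hne)]
          have hcast : (pre.length : Int) + 1 = ((pre ++ [a]).length : Int) := by simp
          rw [hcast]
          refine ih (pre ++ [a]) (d.modify a 0 (· - 1)) (pre.length : Int) a
            (by rw [hl]; simp) (by simp) hd' (by positivity) (by simp) (by simpa using hla)
            ?_ ?_ ?_
          · intro j hj cj hcj
            simp only [Int.toNat_natCast] at hj
            exact lt_of_lt_of_le hcb (hmin j hj cj hcj)
          · intro j hj cj hcj
            simp only [List.length_append, List.length_singleton] at hj
            rcases Nat.lt_succ_iff_lt_or_eq.mp hj with hj' | rfl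
            · exact le_of_lt (lt_of_lt_of_le hcb (hmin j hj' cj hcj))
            · rw [hla] at hcj; injection hcj with h; exact h ▸ le_rfl
          · intro j hj cj hcj
            simp only [List.length_append, List.length_singleton] at hj
            rcases Nat.lt_succ_iff_lt_or_eq.mp hj with hj' | rfl
            · exact hI6 j hj' cj hcj
            · rw [hla] at hcj; injection hcj with h
              rw [hdropa]; exact h ▸ hbrk
        · rw [if_pos (by rw [hd' a]; simp [List.count_eq_zero.mpr hbrk])]
          refine ⟨pre.length, by rw [hl]; simp, hI6, ?_, by positivity, by simp, by simpa using hla,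
            ?_, ?_⟩
          · intro ck hck
            rw [hla] at hck; injection hck with h
            rw [hdropa]; exact h ▸ hbrk
          · intro j hj cj hcj
            simp only [Int.toNat_natCast] at hj
            exact lt_of_lt_of_le hcb (hmin j hj cj hcj)
          · intro j hj cj hcj
            rcases Nat.lt_or_eq_of_le hj with hj' | rfl
            · exact le_of_lt (lt_of_lt_of_le hcb (hmin j hj' cj hcj))
            · rw [hla] at hcj; injection hcj with h; exact h ▸ le_rfl
      · simp only [if_neg hcb]
        have hba : best ≤ a := not_lt.mp hcb
        by_cases hbrk : a ∈ rest'
        · have hne : (d.modify a 0 (· - 1)).getD a 0 ≠ 0 := by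
            rw [hd' a]; have := List.count_pos_iff.mpr hbrk; omega
          rw [if_neg (by simpa using hne)]
          have hcast : (pre.length : Int) + 1 = ((pre ++ [a]).length : Int) := by simp
          rw [hcast]
          refine ih (pre ++ [a]) (d.modify a 0 (· - 1)) pos best
            (by rw [hl]; simp) (by simp) hd' hpos0 (by simp; omega) hlpos hstrict ?_ ?_
          · intro j hj cj hcj
            simp only [List.length_append, List.length_singleton] at hj
            rcases Nat.lt_succ_iff_lt_or_eq.mp hj with hj' | rfl
            · exact hmin j hj' cj hcj
            · rw [hla] at hcj; injection hcj with h; exact h ▸ hba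
          · intro j hj cj hcj
            simp only [List.length_append, List.length_singleton] at hj
            rcases Nat.lt_succ_iff_lt_or_eq.mp hj with hj' | rfl
            · exact hI6 j hj' cj hcj
            · rw [hla] at hcj; injection hcj with h
              rw [hdropa]; exact h ▸ hbrk
        · rw [if_pos (by rw [hd' a]; simp [List.count_eq_zero.mpr hbrk])]
          refine ⟨pre.length, by rw [hl]; simp, hI6, ?_, hpos0, by omega, hlpos, hstrict, ?_⟩
          · intro ck hck
            rw [hla] at hck; injection hck with h
            rw [hdropa]; exact h ▸ hbrk
          · intro j hj cj hcj
            rcases Nat.lt_or_eq_of_le hj with hj' | rfl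
            · exact hmin j hj' cj hcj
            · rw [hla] at hcj; injection hcj with h; exact h ▸ hba

-- scanB's result: characterised by the break index k
theorem scanB_spec (c : Char) (cs : List Char) :
    ∃ k, k < (c :: cs).length ∧
      (∀ j, j < k → ∀ cj, (c :: cs)[j]? = some cj → cj ∈ (c :: cs).drop (j + 1)) ∧
      (∀ ck, (c :: cs)[k]? = some ck → ck ∉ (c :: cs).drop (k + 1)) ∧
      0 ≤ (scanB (PySem.Dict.counter (c :: cs)) (c :: cs) 0 0 c).1 ∧
      (scanB (PySem.Dict.counter (c :: cs)) (c :: cs) 0 0 c).1.toNat ≤ k ∧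
      (c :: cs)[(scanB (PySem.Dict.counter (c :: cs)) (c :: cs) 0 0 c).1.toNat]?
        = some (scanB (PySem.Dict.counter (c :: cs)) (c :: cs) 0 0 c).2 ∧
      (∀ j, j < (scanB (PySem.Dict.counter (c :: cs)) (c :: cs) 0 0 c).1.toNat →
        ∀ cj, (c :: cs)[j]? = some cj → (scanB (PySem.Dict.counter (c :: cs)) (c :: cs) 0 0 c).2 < cj) ∧
      (∀ j, j ≤ k → ∀ cj, (c :: cs)[j]? = some cj →
        (scanB (PySem.Dict.counter (c :: cs)) (c :: cs) 0 0 c).2 ≤ cj) := by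
  have h0 : (c :: cs)[(0:Nat)]? = some c := rfl
  simp only [scanB, lt_irrefl, if_false]
  have hC' := counter_step (PySem.Dict.counter (c :: cs)) c cs
    (fun x => PySem.Dict.getD_counter (c :: cs) x)
  by_cases hbrk : c ∈ cs
  · have hne : ((PySem.Dict.counter (c :: cs)).modify c 0 (· - 1)).getD c 0 ≠ 0 := by
      rw [hC' c]
      have := List.count_pos_iff.mpr hbrk
      omega
    rw [if_neg (by simpa using hne)]
    have := scanB_go (c :: cs) cs [c] ((PySem.Dict.counter (c :: cs)).modify c 0 (· - 1))
      0 c rfl (by simp) hC' le_rfl (by simp) h0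
      (by intro j hj; simp at hj)
      (by
        intro j hj cj hcj
        have hj0 : j = 0 := by simpa using hj
        subst hj0
        rw [h0] at hcj; injection hcj with h; exact h ▸ le_rfl)
      (by
        intro j hj cj hcj
        have hj0 : j = 0 := by simpa using hj
        subst hj0
        rw [h0] at hcj; injection hcj with h; exact h ▸ hbrk)
    simpa using this
  · rw [if_pos (by rw [hC' c]; simp [List.count_eq_zero.mpr hbrk])]
    refine ⟨0, by simp, by omega, ?_, le_rfl, le_rfl, h0, by omega, ?_⟩
    · intro ck hck
      rw [h0] at hck; injection hck with h
      simpa [h] using hbrk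
    · intro j hj cj hcj
      interval_cases j
      rw [h0] at hcj; injection hcj with h; exact h ▸ le_rfl

-- phase decomposition at the selected position: A's output is m followed by A on the reduced list
theorem mainA : ∀ (n : Nat) (l : List Char), l.length ≤ n → (Afold l).reverse = removeRec l := by
  intro n
  induction n with
  | zero =>
      intro l hl
      have : l = [] := List.eq_nil_of_length_eq_zero (by omega)
      subst this
      simp [Afold, removeRec]
  | succ n ihn =>
      intro l hl
      cases l with
      | nil => simp [Afold, removeRec]
      | cons c cs =>
        obtain ⟨k, hk, hG1, hG2, hp0, hpk, hpm, hstrict, hmin⟩ := scanB_spec c cs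
        set pm := scanB (PySem.Dict.counter (c :: cs)) (c :: cs) 0 0 c with hpmdef
        set pos := pm.1.toNat with hposdef
        set m := pm.2 with hmdef
        set t0 := (c :: cs).drop (pos + 1) with ht0def
        set red := t0.filter (fun y => y != m) with hreddef
        -- basic facts about the selected position
        have hlt : pos < (c :: cs).length := (List.getElem?_eq_some_iff.mp hpm).1
        have hgetm : (c :: cs)[pos]'hlt = m := (List.getElem?_eq_some_iff.mp hpm).2
        have hsplit : c :: cs = (c :: cs).take pos ++ (m :: t0) := by
          conv_lhs => rw [← List.take_append_drop pos (c :: cs)]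
          rw [List.drop_eq_getElem_cons hlt, hgetm]
        -- every element of the prefix is above m and occurs again after pos
        have hmem_take : ∀ x ∈ (c :: cs).take pos, m < x := by
          intro x hx
          obtain ⟨j, hj, hjx⟩ := List.getElem_of_mem hx
          have hjp : j < pos := by simp at hj; exact hj.1
          refine hstrict j hjp x ?_
          rw [List.getElem?_eq_some_iff]
          exact ⟨by omega, by rw [← hjx, List.getElem_take]⟩
        have hagain : ∀ x ∈ (c :: cs).take pos, x ∈ t0 := by
          intro x hx
          have hxm : m < x := hmem_take x hx
          obtain ⟨j, hj1, hj2⟩ := lastOcc x _ (List.mem_of_mem_take hx)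
          rcases lt_trichotomy j pos with hjp | rfl | hjp
          · exact absurd (hG1 j (by omega) x hj1) hj2
          · rw [hpm] at hj1
            injection hj1 with h
            exact absurd h (by intro he; exact lt_irrefl m (he ▸ hxm))
          · have harith : pos + 1 + (j - (pos + 1)) = j := by omega
            refine List.mem_of_getElem? (i := j - (pos + 1)) ?_
            rw [ht0def, List.getElem?_drop, harith]
            exact hj1
        -- phase 1: fold over the prefix, with its invariants
        obtain ⟨hIC, hIS, hIN, hIP⟩ := foldA_inv ((c :: cs).take pos) (m :: t0)
          (PySem.Dict.counter ((c :: cs).take pos ++ (m :: t0)))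
          (PySem.Set.empty : PySem.Set Char) [] []
          (fun x => PySem.Dict.getD_counter _ x)
          (by simp [PySem.Set.empty]) (by simp) (by simp)
        have hIP' : ∀ x ∈ (((c :: cs).take pos).foldl stepA
            (PySem.Dict.counter ((c :: cs).take pos ++ (m :: t0)),
             (PySem.Set.empty : PySem.Set Char), [])).2.2, x ∈ (c :: cs).take pos := by
          intro x hx
          simpa using hIP x hx
        set S0 := ((c :: cs).take pos).foldl stepA
          (PySem.Dict.counter ((c :: cs).take pos ++ (m :: t0)),
           (PySem.Set.empty : PySem.Set Char), ([] : List Char)) with hS0def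
        have hmnotin : m ∉ S0.2.2 := fun h => lt_irrefl m (hmem_take m (hIP' m h))
        have hmseen : m ∉ S0.2.1 := fun h => hmnotin ((hIS m).mp h)
        have hC0' : ∀ x, (S0.1.modify m 0 (· - 1)).getD x 0 = (t0.count x : Int) :=
          counter_step S0.1 m t0 hIC
        -- processing m pops the whole stack
        have hall : ∀ x ∈ S0.2.2, m < x ∧ (S0.1.modify m 0 (· - 1)).getD x 0 > 0 := by
          intro x hx
          refine ⟨hmem_take x (hIP' x hx), ?_⟩
          rw [hC0' x]
          exact_mod_cast List.count_pos_iff.mpr (hagain x (hIP' x hx))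
        obtain ⟨hpopnil, hpopseen⟩ :=
          popA_all (S0.1.modify m 0 (· - 1)) m S0.2.2 S0.2.1 hall
        have hr1 : ∀ y, y ∉ (popA (S0.1.modify m 0 (· - 1)) m S0.2.1 S0.2.2).1 := by
          intro y hy
          obtain ⟨h1, h2⟩ := (hpopseen y).mp hy
          exact h2 ((hIS y).mp h1)
        have hstepm : stepA S0 m
            = (S0.1.modify m 0 (· - 1),
               PySem.Set.add (popA (S0.1.modify m 0 (· - 1)) m S0.2.1 S0.2.2).1 m,
               [m]) := by
          simp only [stepA]
          rw [if_neg (by simpa [PySem.Set.contains_iff] using hmseen)]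
          rw [hpopnil]
        -- the guard holds at the start of phase 2
        have hguard : Guard m t0 [] := by
          intro j cj hj hcj hmj
          have hLj : (c :: cs)[pos + 1 + j]? = some cj := by
            rw [← List.getElem?_drop, ← ht0def]
            exact hj
          by_cases hkp : k = pos
          · exfalso
            subst hkp
            have := hG2 m hpm
            rw [ht0def] at hmj
            exact this (by
              rw [← ht0def] at hmj ⊢
              exact List.mem_of_mem_drop hmj)
          · have hposk : pos < k := lt_of_le_of_ne hpk (fun h => hkp h.symm)
            have hck : (c :: cs)[k]? = some ((c :: cs)[k]'hk) := List.getElem?_eq_getElem hk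
            have hjk : k < pos + 1 + j := by
              by_contra hle
              exact absurd (hmin (pos + 1 + j) (by omega) cj hLj) (not_le.mpr hcj)
            refine Or.inr ⟨k - pos - 1, by omega, (c :: cs)[k]'hk, ?_, ?_⟩
            · rw [ht0def, List.getElem?_drop]
              have : pos + 1 + (k - pos - 1) = k := by omega
              rw [this]
              exact hck
            · rw [ht0def, List.drop_drop]
              have : pos + 1 + (k - pos - 1 + 1) = k + 1 := by omega
              rw [this]
              exact hG2 _ hck
        -- phase 2: the simulation
        have hsim := simA m t0 (S0.1.modify m 0 (· - 1)) (PySem.Dict.counter red)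
          (PySem.Set.add (popA (S0.1.modify m 0 (· - 1)) m S0.2.1 S0.2.2).1 m)
          (PySem.Set.empty : PySem.Set Char) []
          hC0'
          (fun x => by rw [hreddef] at *; exact PySem.Dict.getD_counter _ x)
          (fun x => by
            rw [PySem.Set.mem_add]
            constructor
            · rintro (h | h)
              · exact absurd h (hr1 x)
              · exact Or.inl h
            · rintro (h | h)
              · exact Or.inr h
              · simp [PySem.Set.empty] at h)
          (fun x => by simp [PySem.Set.empty])
          (by simp) (by simp) hguard
        -- assemble the A side
        have hAside : Afold (c :: cs) = Afold red ++ [m] := by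
          rw [Afold, Afold]
          conv_lhs => rw [hsplit, List.foldl_append, List.foldl_cons]
          rw [← hS0def, hstepm]
          simpa [hreddef] using hsim
        -- the B side unfolds to the same recursion
        have hredeq : PySem.Chars.replace
            (PySem.List.slice (c :: cs) (some (pm.1 + 1)) none) [pm.2] [] = red := by
          rw [replace_single_nil, PySem.List.slice_from (xs := c :: cs)
            (by omega : (0:Int) ≤ pm.1 + 1), hreddef, ht0def]
          congr 2
          omega
        have hB : removeRec (c :: cs) = m :: removeRec red := by
          conv_lhs => rw [removeRec]
          rw [← hpmdef, hredeq]
        -- recurse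
        have hlenred : red.length ≤ n := by
          have h1 : red.length ≤ t0.length := by
            rw [hreddef]; exact List.length_filter_le _ _
          have h2 : t0.length = (c :: cs).length - (pos + 1) := by
            rw [ht0def]; exact List.length_drop ..
          simp only [List.length_cons] at hl hlt h2
          omega
        rw [hAside, hB, List.reverse_append, ← ihn red hlenred]
        rfl

-- ===== VERDICT (by name: the statement is the Claim_ definition above) =====
theorem remove_n_sort_spec : Claim_equal_remove_n_sort := by
  intro s _
  unfold Spec_remove_n_sort remove_n_sort remove_n_sort_alt
  have h := mainA s.toList.length s.toList le_rfl
  simp only [Afold] at h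
  rw [← h]
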